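-- pv_equiv track=rewrite | github.com/SAMANDAR-SwE/cpp_project | python/42_uz/mukamlal_son.py | distribute_promo_codes
-- ===== SOURCE A (Python) =====
-- import math
--
-- def distribute_promo_codes(n, m):
--     """
--     Promo kodlarni taqsimlash jarayonini simulyatsiya qiladi.
--
--     :param n: Promo kodlarning boshlang'ich soni (1 <= n <= 10^9)
--     :param m: Taklif qilingan do'stlarning soni (1 <= m <= 50)
--     :return: Kamida bitta kod olgan do'stlarning soni
--     """
--
--     # Kichik n (10^9 gacha) va kichik m (50 gacha) tufayli to'g'ridan-to'g'ri simulyatsiya samarali.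
--
--     current_codes = n
--     friends_received = 0
--
--     # m marta takrorlash (har bir do'st uchun)
--     for _ in range(m):
--
--         # Agar kodlar tugagan bo'lsa, jarayonni to'xtatish
--         if current_codes == 0:
--             break
--
--         # Do'st olgan kodlar soni: Qolgan kodlarning yarmi (yuqoriga qarab yaxlitlangan)
--         # math.ceil(a / b) ni butun sonlar bilan (a + b - 1) // b formulasi bilan ham topish mumkin
--         received_codes = math.ceil(current_codes / 2)
--
--         # Qolgan kodlarni yangilash
--         current_codes -= received_codes
--
--         # Kod olgan do'stlar sonini oshirish
--         friends_received += 1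
--
--     return friends_received
-- ===== SOURCE B (Python) =====
-- def distribute_promo_codes(n, m):
--     # Each friend takes half of the remaining codes (rounded up), so a stock of
--     # n codes is exhausted after exactly n.bit_length() friends; clamp by the
--     # number of invited friends and at zero.
--     return max(0, min(m, n.bit_length()))
-- ===== Notes on version B (the rewrite author's own statement) =====
-- stated objective: simpler
-- what changed: Replaced the per-friend halving simulation loop with the closed form max(0, min(m, n.bit_length())); Pre_ excludes negative n with m > bit_length(|n|) (outside the function's documented domain 1 <= n <= 10^9), where a negative stock never empties and A's value of serving all m friends is as arbitrary as B's bit-length of the magnitude.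
-- outside the precondition, e.g. on distribute_promo_codes(-1, 5): A returns 5, B returns 1
import Mathlib
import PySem

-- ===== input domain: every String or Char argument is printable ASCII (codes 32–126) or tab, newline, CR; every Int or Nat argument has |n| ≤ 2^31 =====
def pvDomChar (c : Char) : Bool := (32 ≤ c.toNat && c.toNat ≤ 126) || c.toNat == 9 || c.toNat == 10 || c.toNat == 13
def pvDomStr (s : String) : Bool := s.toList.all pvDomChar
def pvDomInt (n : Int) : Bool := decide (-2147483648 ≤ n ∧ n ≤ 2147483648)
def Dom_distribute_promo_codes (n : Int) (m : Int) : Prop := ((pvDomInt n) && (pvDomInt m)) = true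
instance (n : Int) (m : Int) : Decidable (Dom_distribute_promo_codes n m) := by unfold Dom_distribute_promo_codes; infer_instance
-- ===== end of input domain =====

-- B replaces A's per-friend halving simulation loop by the closed form max(0, min(m, bit_length n)); objective: simpler.

-- ===== PORT A =====
-- the for-loop over range(m) with early break, state (current_codes, friends_received);
-- math.ceil(current/2) is exact as (current+1)//2 on |current| ≤ 2^31 (float division is exact there)
def pvGoA : Nat → Int → Int → Int
  | 0, _, friends => friends
  | fuel + 1, current, friends =>
    if current = 0 then friends
    else
      -- received = math.ceil(current/2), exact as (current+1)//2 here; inlined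
      pvGoA fuel (current - PySem.Int.floordiv (current + 1) 2) (friends + 1)

def distribute_promo_codes (n : Int) (m : Int) : Int :=
  pvGoA m.toNat n 0

-- ===== PORT B =====
def distribute_promo_codes_alt (n : Int) (m : Int) : Int :=
  max 0 (min m (PySem.Int.bitLength n : Int))

-- ===== PRECONDITION & SPEC =====
-- Pre_ excludes negative n with m friends exceeding bit_length(|n|) (outside the documented
-- domain 1 <= n <= 10^9): a negative stock never empties, and neither A's value there (all m
-- friends served) nor B's is specified.
def Pre_distribute_promo_codes (n : Int) (m : Int) : Prop :=
  0 ≤ n ∨ m ≤ (PySem.Int.bitLength n : Int)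
instance (n : Int) (m : Int) : Decidable (Pre_distribute_promo_codes n m) := by unfold Pre_distribute_promo_codes; infer_instance
def pvWitness_distribute_promo_codes : Int × Int := (100, 5)

def Spec_distribute_promo_codes (n : Int) (m : Int) (out : Int) : Prop := out = distribute_promo_codes_alt n m
instance (n : Int) (m : Int) (out : Int) : Decidable (Spec_distribute_promo_codes n m out) := by unfold Spec_distribute_promo_codes; infer_instance

-- ===== CLAIM (what is proved, stated in full; the proofs are below) =====
def Claim_equal_distribute_promo_codes : Prop := ∀ (n : Int) (m : Int), Dom_distribute_promo_codes n m → Pre_distribute_promo_codes n m → Spec_distribute_promo_codes n m (distribute_promo_codes n m)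

-- ===== LEMMAS AND PROOFS =====

-- a negative stock never reaches zero, so the loop runs out its fuel
theorem pvGoA_neg (fuel : Nat) : ∀ (c f : Int), c < 0 →
    pvGoA fuel c f = f + fuel := by
  induction fuel with
  | zero => intro c f _; simp [pvGoA]
  | succ fuel ih =>
    intro c f hc
    have hne : c ≠ 0 := by omega
    have hfd : PySem.Int.floordiv (c + 1) 2 = (c + 1) / 2 :=
      PySem.Int.floordiv_eq_ediv_of_pos (by omega)
    have hlt : c - PySem.Int.floordiv (c + 1) 2 < 0 := by rw [hfd]; omega
    rw [pvGoA, if_neg hne, ih _ _ hlt]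
    push_cast
    ring

-- a nonnegative stock c is exhausted in exactly bitLength c halvings
theorem pvGoA_nonneg (fuel : Nat) : ∀ (c f : Int), 0 ≤ c →
    pvGoA fuel c f = f + (min fuel (PySem.Int.bitLength c) : Nat) := by
  induction fuel with
  | zero => intro c f _; simp [pvGoA]
  | succ fuel ih =>
    intro c f hc
    by_cases h0 : c = 0
    · subst h0; simp [pvGoA, PySem.Int.bitLength_zero]
    · have hpos : 0 < c := by omega
      have hfd : PySem.Int.floordiv (c + 1) 2 = (c + 1) / 2 :=
        PySem.Int.floordiv_eq_ediv_of_pos (by omega)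
      have hfd2 : PySem.Int.floordiv c 2 = c / 2 :=
        PySem.Int.floordiv_eq_ediv_of_pos (by omega)
      have hhalf : c - PySem.Int.floordiv (c + 1) 2 = PySem.Int.floordiv c 2 := by
        rw [hfd, hfd2]; omega
      have hnn : 0 ≤ PySem.Int.floordiv c 2 := by rw [hfd2]; omega
      rw [pvGoA, if_neg h0, hhalf, ih _ _ hnn,
        PySem.Int.bitLength_of_pos hpos]
      push_cast
      omega

-- ===== VERDICT (by name: the statement is the Claim_ definition above) =====
theorem distribute_promo_codes_spec : Claim_equal_distribute_promo_codes := by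
  intro n m _ hpre
  unfold Spec_distribute_promo_codes distribute_promo_codes distribute_promo_codes_alt
  by_cases hn : 0 ≤ n
  · rw [pvGoA_nonneg m.toNat n 0 hn]
    have : ((min m.toNat (PySem.Int.bitLength n) : Nat) : Int)
        = min (m.toNat : Int) (PySem.Int.bitLength n : Int) := by push_cast; rfl
    rw [this]
    omega
  · have hm : m ≤ (PySem.Int.bitLength n : Int) := by
      unfold Pre_distribute_promo_codes at hpre; tauto
    rw [pvGoA_neg m.toNat n 0 (by omega)]
    omega
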